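-- pv_equiv track=rewrite | github.com/Bystroushaak/notion_blog_generator | lib/preprocessors/unfuck_filenames.py | _remove_dup_underscores
-- ===== SOURCE A (Python) =====
-- def _remove_dup_underscores(input_str):
--     last = ""
--     output = ""
--     for c in input_str:
--         if c == "_" and last == "_":
--             continue
--
--         output += c
--         last = c
--
--     if output.startswith("_"):
--         output = output[1:]
--     if output.endswith("_"):
--         output = output[:-1]
--
--     return output
-- ===== SOURCE B (Python) =====
-- def _remove_dup_underscores(input_str):
--     return "_".join(filter(None, input_str.split("_")))
-- ===== Notes on version B (the rewrite author's own statement) =====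
-- stated objective: idiomatic
-- what changed: Replaces the character-by-character accumulation loop with previous-character state and post-hoc end stripping by a single split-on-underscore / drop-empty-tokens / rejoin expression.
import Mathlib
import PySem

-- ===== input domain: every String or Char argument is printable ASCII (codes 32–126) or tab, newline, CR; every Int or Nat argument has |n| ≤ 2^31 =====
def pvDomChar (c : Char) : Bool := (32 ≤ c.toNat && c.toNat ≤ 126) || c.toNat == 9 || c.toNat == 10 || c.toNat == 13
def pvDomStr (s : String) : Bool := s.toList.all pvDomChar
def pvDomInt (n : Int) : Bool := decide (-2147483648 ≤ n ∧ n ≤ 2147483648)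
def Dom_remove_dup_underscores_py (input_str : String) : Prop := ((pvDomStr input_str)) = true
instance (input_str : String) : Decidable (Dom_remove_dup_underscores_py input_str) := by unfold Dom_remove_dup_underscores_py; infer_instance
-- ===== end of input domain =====

-- B replaces A's character loop ('last' state plus end stripping) by split on '_' / drop empty tokens / rejoin; same return value.

-- ===== PORT A =====
-- loop state: (last, output); then strip one leading and one trailing '_'
def remove_dup_underscores_py (input_str : String) : String :=
  let st := input_str.toList.foldl
    (fun (st : List Char × List Char) c =>
      if c = '_' ∧ st.1 = ['_'] then st
      else ([c], st.2 ++ [c])) ([], [])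
  let output := st.2
  let output := if PySem.Chars.startswith output ['_'] then PySem.Chars.slice output (some 1) none else output
  let output := if PySem.Chars.endswith output ['_'] then PySem.Chars.slice output none (some (-1)) else output
  String.ofList output

-- ===== PORT B =====
-- "_".join(filter(None, input_str.split("_")))
def remove_dup_underscores_py_alt (input_str : String) : String :=
  String.ofList (PySem.Chars.join ['_']
    ((PySem.Chars.splitOn input_str.toList ['_']).filter (· ≠ [])))

-- ===== PRECONDITION & SPEC =====
def Spec_remove_dup_underscores_py (input_str : String) (out : String) : Prop := out = remove_dup_underscores_py_alt input_str
instance (input_str : String) (out : String) : Decidable (Spec_remove_dup_underscores_py input_str out) := by unfold Spec_remove_dup_underscores_py; infer_instance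

-- ===== CLAIM (what is proved, stated in full; the proofs are below) =====
def Claim_equal_remove_dup_underscores_py : Prop := ∀ (input_str : String), Dom_remove_dup_underscores_py input_str → Spec_remove_dup_underscores_py input_str (remove_dup_underscores_py input_str)

-- ===== LEMMAS AND PROOFS =====
def pvSp : List Char → List (List Char)
  | [] => [[]]
  | c :: r => if c = '_' then [] :: pvSp r else (pvSp r).modifyHead (c :: ·)

theorem pvSp_ne_nil (cs : List Char) : pvSp cs ≠ [] := by
  cases cs with
  | nil => simp [pvSp]
  | cons c r =>
    simp only [pvSp]
    split
    · simp
    · cases h : pvSp r with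
      | nil => exact absurd h (pvSp_ne_nil r)
      | cons a l => simp [List.modifyHead]

theorem pvSplitOn_go (fuel : Nat) (l cur : List Char) (acc : List (List Char)) (h : l.length ≤ fuel) :
    PySem.Chars.splitOn.go ['_'] fuel l cur acc
      = acc.reverse ++ (pvSp l).modifyHead (cur.reverse ++ ·) := by
  induction fuel generalizing l cur acc with
  | zero =>
    cases l with
    | nil =>
      rw [PySem.Chars.splitOn.go.eq_def]
      simp [pvSp, List.modifyHead]
    | cons c r => simp at h
  | succ n ih =>
    cases l with
    | nil =>
      rw [PySem.Chars.splitOn.go.eq_def]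
      simp [pvSp, List.modifyHead]
    | cons c r =>
      simp only [List.length_cons, Nat.succ_le_succ_iff] at h
      rw [PySem.Chars.splitOn.go.eq_def]
      by_cases hc : c = '_'
      · subst hc
        have hp : (['_'].isPrefixOf ('_' :: r)) = true := by simp [List.isPrefixOf]
        simp only [hp, if_true, List.length_cons, List.length_nil, List.drop_succ_cons,
          List.drop_zero]
        rw [ih r [] _ (by simpa using h)]
        simp only [pvSp, if_pos rfl, List.modifyHead, List.reverse_nil, List.reverse_cons,
          List.append_assoc, List.singleton_append, List.nil_append]
        cases hr : pvSp r with
        | nil => exact absurd hr (pvSp_ne_nil r)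
        | cons a t => simp
      · have hp : (['_'].isPrefixOf (c :: r)) = false := by
          simp [List.isPrefixOf]
          exact fun h' => hc h'.symm
        simp only [hp, Bool.false_eq_true, if_false]
        rw [ih _ _ _ h]
        simp only [pvSp, if_neg hc]
        cases hr : pvSp r with
        | nil => exact absurd hr (pvSp_ne_nil r)
        | cons a t => simp [List.modifyHead]

theorem pvSplitOn_eq (cs : List Char) : PySem.Chars.splitOn cs ['_'] = pvSp cs := by
  rw [PySem.Chars.splitOn, pvSplitOn_go _ _ _ _ (by omega)]
  cases h : pvSp cs with
  | nil => exact absurd h (pvSp_ne_nil cs)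
  | cons a l => simp [List.modifyHead]

def pvJoinF : List (List Char) → List Char
  | [] => []
  | t :: ts => t ++ ts.flatMap (fun u => '_' :: u)

theorem pvJoin_eq (ts : List (List Char)) : PySem.Chars.join ['_'] ts = pvJoinF ts := by
  induction ts with
  | nil => rfl
  | cons t ts ih =>
    cases ts with
    | nil => simp [PySem.Chars.join, pvJoinF, List.intercalate]
    | cons u us =>
      simp only [PySem.Chars.join, List.intercalate] at ih ⊢
      rw [show List.intersperse ['_'] (t :: u :: us) = t :: ['_'] :: List.intersperse ['_'] (u :: us) from rfl]
      simp only [List.flatten_cons, pvJoinF, List.flatMap_cons] at ih ⊢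
      rw [ih]
      simp

def pvCw (b : Bool) : List Char → List Char
  | [] => []
  | c :: r => if c = '_' ∧ b then pvCw true r else c :: pvCw (c = '_') r

theorem pvFoldl_eq (cs : List Char) (last out : List Char) :
    (cs.foldl (fun (st : List Char × List Char) c =>
      if c = '_' ∧ st.1 = ['_'] then st else ([c], st.2 ++ [c])) (last, out)).2
      = out ++ (pvCw (last = ['_']) cs : List Char) := by
  induction cs generalizing last out with
  | nil => simp [pvCw]
  | cons c r ih =>
    simp only [List.foldl_cons]
    by_cases hc : c = '_' ∧ last = ['_']
    · rcases hc with ⟨rfl, rfl⟩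
      rw [if_pos ⟨rfl, rfl⟩, ih ['_'] out]
      simp [pvCw]
    · rw [if_neg hc, ih [c] (out ++ [c])]
      by_cases hcu : c = '_'
      · subst hcu
        have hl : ¬ last = ['_'] := fun h => hc ⟨rfl, h⟩
        simp [pvCw, hl]
      · simp [pvCw, hcu]

theorem pvSp_no_underscore (cs : List Char) : ∀ t ∈ pvSp cs, '_' ∉ t := by
  induction cs with
  | nil => simp [pvSp]
  | cons c r ih =>
    simp only [pvSp]
    split
    · intro t ht
      rcases List.mem_cons.1 ht with rfl | ht
      · simp
      · exact ih t ht
    · rename_i hc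
      cases h : pvSp r with
      | nil => exact absurd h (pvSp_ne_nil r)
      | cons a l =>
        intro t ht
        simp only [List.modifyHead] at ht
        rcases List.mem_cons.1 ht with rfl | ht
        · intro hm
          rcases List.mem_cons.1 hm with h' | h'
          · exact hc h'.symm
          · exact ih a (by rw [h]; exact List.mem_cons_self) h'
        · exact ih t (by rw [h]; exact List.mem_cons_of_mem _ ht)

theorem pvJoinF_cons₂ (x y : List Char) (ts : List (List Char)) :
    pvJoinF (x :: y :: ts) = x ++ '_' :: pvJoinF (y :: ts) := by
  simp [pvJoinF]

theorem pvJoinF_head (ts : List (List Char)) (hne : ∀ t ∈ ts, t ≠ []) (hnu : ∀ t ∈ ts, '_' ∉ t) :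
    ¬ (pvJoinF ts).head? = some '_' := by
  cases ts with
  | nil => simp [pvJoinF]
  | cons t ts =>
    have h1 : t ≠ [] := hne t List.mem_cons_self
    have h2 : '_' ∉ t := hnu t List.mem_cons_self
    cases t with
    | nil => exact absurd rfl h1
    | cons a u =>
      simp only [pvJoinF, List.cons_append, List.head?_cons, Option.some.injEq]
      intro h
      exact h2 (h ▸ List.mem_cons_self)

theorem pvJoinF_last (ts : List (List Char)) (hne : ∀ t ∈ ts, t ≠ []) (hnu : ∀ t ∈ ts, '_' ∉ t) :
    ¬ (pvJoinF ts).getLast? = some '_' := by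
  induction ts with
  | nil => simp [pvJoinF]
  | cons t ts ih =>
    cases ts with
    | nil =>
      have h2 : '_' ∉ t := hnu t List.mem_cons_self
      simp only [pvJoinF, List.flatMap_nil, List.append_nil]
      exact fun h => h2 (List.mem_of_getLast? h)
    | cons u us =>
      rw [pvJoinF_cons₂, List.getLast?_append]
      have ih' := ih (fun x hx => hne x (List.mem_cons_of_mem _ hx))
        (fun x hx => hnu x (List.mem_cons_of_mem _ hx))
      cases hj : (pvJoinF (u :: us)).getLast? with
      | none =>
        exfalso
        have hu : u ≠ [] := hne u (List.mem_cons_of_mem _ List.mem_cons_self)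
        cases u with
        | nil => exact hu rfl
        | cons b v =>
          simp only [pvJoinF, List.cons_append, List.getLast?_cons] at hj
          exact absurd hj (by simp)
      | some x =>
        have hx : ¬ x = '_' := fun h => ih' (by rw [hj, h])
        simp [List.getLast?_cons, hj, hx]

def pvTks (cs : List Char) : List (List Char) := (pvSp cs).filter (· ≠ [])

theorem pvFlatMap_eq (ts : List (List Char)) (h : ts ≠ []) :
    ts.flatMap (fun u => '_' :: u) = '_' :: pvJoinF ts := by
  cases ts with
  | nil => exact absurd rfl h
  | cons t ts => simp [pvJoinF]

theorem pvTks_cons_und (r : List Char) : pvTks ('_' :: r) = pvTks r := by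
  simp [pvTks, pvSp]

theorem pvTks_cons_ne (c : Char) (r : List Char) (hc : ¬ c = '_') :
    ∀ h t, pvSp r = h :: t → pvTks (c :: r) = (c :: h) :: t.filter (· ≠ []) := by
  intro h t hsp
  simp [pvTks, pvSp, if_neg hc, hsp, List.modifyHead]

theorem pvLast_of_tks_nil (cs : List Char) (hne : cs ≠ []) (ht : pvTks cs = []) :
    cs.getLast? = some '_' := by
  induction cs with
  | nil => exact absurd rfl hne
  | cons c r ih =>
    by_cases hc : c = '_'
    · subst hc
      cases r with
      | nil => rfl
      | cons d r' =>
        rw [List.getLast?_cons_cons]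
        exact ih (by simp) (by rw [← pvTks_cons_und]; exact ht)
    · exfalso
      cases hsp : pvSp r with
      | nil => exact pvSp_ne_nil r hsp
      | cons h t => rw [pvTks_cons_ne c r hc h t hsp] at ht; simp at ht

theorem pvCw_decomp (cs : List Char) :
    (pvCw true cs = pvJoinF (pvTks cs) ++ (if cs.getLast? = some '_' ∧ pvTks cs ≠ [] then ['_'] else [])) ∧
    (pvCw false cs = (if cs.head? = some '_' then ['_'] else []) ++ pvJoinF (pvTks cs) ++
      (if cs.getLast? = some '_' ∧ (pvTks cs ≠ [] ∨ ¬ cs.head? = some '_') then ['_'] else [])) := by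
  induction cs with
  | nil => constructor <;> simp [pvCw, pvTks, pvSp, pvJoinF]
  | cons c r ih =>
    obtain ⟨ihP, ihQ⟩ := ih
    by_cases hc : c = '_'
    · subst hc
      have hcw : pvCw true ('_' :: r) = pvCw true r := by simp [pvCw]
      have hcwf : pvCw false ('_' :: r) = '_' :: pvCw true r := by simp [pvCw]
      cases r with
      | nil =>
        constructor
        · simp [hcw, pvCw, pvTks, pvSp, pvJoinF]
        · simp [hcwf, pvCw, pvTks, pvSp, pvJoinF]
      | cons d r' =>
        have hgl : ('_' :: d :: r').getLast? = (d :: r').getLast? := List.getLast?_cons_cons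
        constructor
        · rw [hcw, ihP, pvTks_cons_und, hgl]
        · rw [hcwf, ihP, pvTks_cons_und, hgl]
          simp only [List.head?_cons, Option.some.injEq, if_pos rfl]
          by_cases hT : pvTks (d :: r') ≠ []
          · simp [hT]
          · simp only [hT, or_false, and_false, if_false, List.append_nil]
            simp only [not_not] at hT
            simp [hT]
    · -- c ≠ '_'
      cases hsp : pvSp r with
      | nil => exact absurd hsp (pvSp_ne_nil r)
      | cons h t =>
        have htks := pvTks_cons_ne c r hc h t hsp
        have hcw : pvCw true (c :: r) = c :: pvCw false r := by
          simp [pvCw, hc]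
        have hcwf : pvCw false (c :: r) = c :: pvCw false r := by
          simp [pvCw, hc]
        have hTne : pvTks (c :: r) ≠ [] := by rw [htks]; simp
        have hP : pvCw true (c :: r) = pvJoinF (pvTks (c :: r)) ++
            (if (c :: r).getLast? = some '_' ∧ pvTks (c :: r) ≠ [] then ['_'] else []) := by
          rw [hcw, ihQ, htks]
          cases r with
          | nil =>
            injection hsp with h1 h2
            subst h1; subst h2
            simp [pvTks, pvSp, pvJoinF, pvCw, hc]
          | cons d r' =>
            have hgl : (c :: d :: r').getLast? = (d :: r').getLast? := List.getLast?_cons_cons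
            rw [hgl]
            by_cases hd : d = '_'
            · subst hd
              have hh : ([] : List Char) :: pvSp r' = h :: t := by
                rw [← hsp]; simp [pvSp]
              injection hh with h1 h2
              subst h1; subst h2
              have hTr : pvTks ('_' :: r') = (pvSp r').filter (· ≠ []) := by
                rw [pvTks_cons_und]; rfl
              simp only [List.head?_cons, Option.some.injEq, if_pos rfl, hTr]
              set T' := (pvSp r').filter (· ≠ []) with hT'
              by_cases hT : T' = []
              · have hglu : ('_' :: r').getLast? = some '_' :=
                  pvLast_of_tks_nil ('_' :: r') (by simp) (by rw [pvTks_cons_und]; exact hT)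
                simp [hT, pvJoinF, hglu]
              · simp only [pvJoinF]
                rw [pvFlatMap_eq T' hT]
                by_cases hgl' : ('_' :: r').getLast? = some '_'
                · simp [hgl', hT]
                  rw [pvJoinF.eq_def]
                · simp [hgl', hT]
                  rw [pvJoinF.eq_def]
            · have hh : ∃ h', h = d :: h' := by
                cases hsp'' : pvSp r' with
                | nil => exact absurd hsp'' (pvSp_ne_nil r')
                | cons b m =>
                  have heq : (d :: b) :: m = h :: t := by
                    rw [← hsp]; simp [pvSp, hd, hsp'', List.modifyHead]
                  injection heq with h1 _
                  exact ⟨b, h1.symm⟩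
              obtain ⟨h', rfl⟩ := hh
              have hTr : pvTks (d :: r') = (d :: h') :: t.filter (· ≠ []) := by
                cases hsp'' : pvSp r' with
                | nil => exact absurd hsp'' (pvSp_ne_nil r')
                | cons b m =>
                  have heq : (d :: b) :: m = (d :: h') :: t := by
                    rw [← hsp]; simp [pvSp, hd, hsp'', List.modifyHead]
                  injection heq with h1 h2
                  injection h1 with _ h1b
                  rw [pvTks_cons_ne d r' hd b m hsp'', h2]
                  rw [h1b]
              simp only [List.head?_cons, Option.some.injEq, hd, if_false, hTr, List.nil_append]
              simp only [pvJoinF, ne_eq]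
              by_cases hgl' : (d :: r').getLast? = some '_'
              · simp [hgl', hd]
              · simp [hgl', hd]
        refine ⟨hP, ?_⟩
        rw [hcwf, ← hcw, hP]
        simp only [List.head?_cons, Option.some.injEq, hc, if_false, List.nil_append]
        simp [hTne, hc]

theorem pvTks_ne_of_head (cs : List Char) (hne : cs ≠ []) (hh : ¬ cs.head? = some '_') :
    pvTks cs ≠ [] := by
  cases cs with
  | nil => exact absurd rfl hne
  | cons c r =>
    have hc : ¬ c = '_' := fun h => hh (by simp [h])
    cases hsp : pvSp r with
    | nil => exact absurd hsp (pvSp_ne_nil r)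
    | cons h t => rw [pvTks_cons_ne c r hc h t hsp]; simp

theorem pvStarts_iff (l : List Char) : PySem.Chars.startswith l ['_'] = true ↔ l.head? = some '_' := by
  rw [PySem.Chars.startswith_iff]
  cases l with
  | nil => simp
  | cons a t => simp [List.cons_prefix_cons, eq_comm]

theorem pvEnds_iff (l : List Char) : PySem.Chars.endswith l ['_'] = true ↔ l.getLast? = some '_' := by
  rw [PySem.Chars.endswith_iff]
  constructor
  · rintro ⟨p, rfl⟩
    simp
  · intro h
    obtain ⟨p, rfl⟩ := List.getLast?_eq_some_iff.1 h
    exact ⟨p, rfl⟩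

theorem slice_neg_one (l : List Char) : PySem.List.slice l none (some (-1)) = l.dropLast := by
  rcases l.eq_nil_or_concat with h | ⟨l', a, rfl⟩
  · subst h; rfl
  · simp only [PySem.List.slice, PySem.List.clampIdx, List.concat_eq_append]
    have h1 : ¬ ((((l' ++ [a]).length : Int) + -1) < 0) := by simp
    have h2 : (((l' ++ [a]).length : Int) + -1).toNat = l'.length := by simp
    simp only [if_pos (by norm_num : (-1:Int) < 0), if_neg h1, h2, Nat.sub_zero, List.drop_zero,
      List.dropLast_concat, List.take_append_of_le_length (le_refl _), List.take_length]

theorem slice_one (l : List Char) : PySem.List.slice l (some 1) none = l.drop 1 := by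
  rw [PySem.List.slice_from l (by norm_num : (0:Int) ≤ 1)]; rfl

theorem pvMain (cs : List Char) :
    (let st := cs.foldl (fun (st : List Char × List Char) c =>
        if c = '_' ∧ st.1 = ['_'] then st else ([c], st.2 ++ [c])) ([], []);
     let output := st.2;
     let output := if PySem.Chars.startswith output ['_'] then PySem.Chars.slice output (some 1) none else output;
     if PySem.Chars.endswith output ['_'] then PySem.Chars.slice output none (some (-1)) else output)
      = pvJoinF (pvTks cs) := by
  have h0 : (cs.foldl (fun (st : List Char × List Char) c =>
      if c = '_' ∧ st.1 = ['_'] then st else ([c], st.2 ++ [c])) ([], [])).2 = pvCw false cs := by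
    rw [pvFoldl_eq]; simp
  simp only [h0]
  have hdec := (pvCw_decomp cs).2
  have hne : ∀ t ∈ pvTks cs, t ≠ [] := by
    intro t ht
    simpa using (List.mem_filter.1 ht).2
  have hnu : ∀ t ∈ pvTks cs, '_' ∉ t :=
    fun t ht => pvSp_no_underscore cs t (List.mem_filter.1 ht).1
  have hJlast : ¬ (pvJoinF (pvTks cs)).getLast? = some '_' := pvJoinF_last _ hne hnu
  have hJhead : ¬ (pvJoinF (pvTks cs)).head? = some '_' := pvJoinF_head _ hne hnu
  have step2 : ∀ J : List Char, ¬ J.getLast? = some '_' →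
      (if PySem.Chars.endswith (J ++ if cs.getLast? = some '_' then ['_'] else []) ['_'] then
        PySem.Chars.slice (J ++ if cs.getLast? = some '_' then ['_'] else []) none (some (-1))
       else (J ++ if cs.getLast? = some '_' then ['_'] else [])) = J := by
    intro J hJl
    by_cases hgl : cs.getLast? = some '_'
    · rw [if_pos hgl]
      have h2 : PySem.Chars.endswith (J ++ ['_']) ['_'] = true := by
        rw [pvEnds_iff]; simp
      rw [h2, if_pos rfl, PySem.Chars.slice_eq_listSlice, slice_neg_one, List.dropLast_concat]
    · rw [if_neg hgl, List.append_nil]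
      have h2 : ¬ PySem.Chars.endswith J ['_'] = true := by
        rw [pvEnds_iff]; exact hJl
      rw [if_neg h2]
  rcases eq_or_ne cs [] with rfl | hcne
  · rfl
  by_cases hh : cs.head? = some '_'
  · -- leading underscore present
    by_cases hT : pvTks cs = []
    · -- all underscores
      have hgl : cs.getLast? = some '_' := pvLast_of_tks_nil cs hcne hT
      have hD : pvCw false cs = ['_'] := by
        rw [hdec, if_pos hh, hT]
        simp [pvJoinF, hh]
      rw [hD, hT]
      rfl
    · have hD : pvCw false cs = '_' :: (pvJoinF (pvTks cs) ++ if cs.getLast? = some '_' then ['_'] else []) := by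
        rw [hdec, if_pos hh, if_congr (by simp [hT] : (cs.getLast? = some '_' ∧ (pvTks cs ≠ [] ∨ ¬ cs.head? = some '_')) ↔ cs.getLast? = some '_') rfl rfl]
        simp
      rw [hD]
      have h1 : PySem.Chars.startswith ('_' :: (pvJoinF (pvTks cs) ++ if cs.getLast? = some '_' then ['_'] else [])) ['_'] = true := by
        rw [pvStarts_iff]; simp
      rw [h1, if_pos rfl, PySem.Chars.slice_eq_listSlice, slice_one, List.drop_one, List.tail_cons]
      exact step2 _ hJlast
  · -- no leading underscore
    have hT : pvTks cs ≠ [] := pvTks_ne_of_head cs hcne hh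
    have hD : pvCw false cs = pvJoinF (pvTks cs) ++ if cs.getLast? = some '_' then ['_'] else [] := by
      rw [hdec, if_neg hh, if_congr (by simp [hh] : (cs.getLast? = some '_' ∧ (pvTks cs ≠ [] ∨ ¬ cs.head? = some '_')) ↔ cs.getLast? = some '_') rfl rfl]
      simp
    rw [hD]
    have hJne : pvJoinF (pvTks cs) ≠ [] := by
      cases hTk : pvTks cs with
      | nil => exact absurd hTk hT
      | cons t ts =>
        have := hne t (by rw [hTk]; exact List.mem_cons_self)
        cases t with
        | nil => exact absurd rfl this
        | cons a u => simp [pvJoinF]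
    have h1 : ¬ PySem.Chars.startswith (pvJoinF (pvTks cs) ++ if cs.getLast? = some '_' then ['_'] else []) ['_'] = true := by
      rw [pvStarts_iff, List.head?_append]
      cases hJh : (pvJoinF (pvTks cs)).head? with
      | none => exact absurd (List.head?_eq_none_iff.1 hJh) hJne
      | some x =>
        have hx : ¬ x = '_' := fun h => hJhead (by rw [hJh, h])
        simp [hx]
    rw [if_neg h1]
    exact step2 _ hJlast


-- ===== VERDICT (by name: the statement is the Claim_ definition above) =====
theorem remove_dup_underscores_py_spec : Claim_equal_remove_dup_underscores_py := by
  intro input_str _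
  unfold Spec_remove_dup_underscores_py remove_dup_underscores_py remove_dup_underscores_py_alt
  rw [pvSplitOn_eq, pvJoin_eq]
  exact congrArg String.ofList (pvMain input_str.toList)
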